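-- pv_equiv track=rewrite | github.com/Glaffis/informaticshomeworks | string_in.py | count_in
-- ===== SOURCE A (Python) =====
-- def count_in(s, text):
--     n = len(s)
--     result = 0
--     for i in range(n):
--         shift = s[i:] + s[:i]
--         for j in range(len(text)-n+1):
--             if text[j:j+n] == shift:
--                 result+=1
--     return result
-- ===== SOURCE B (Python) =====
-- def count_in(s, text):
--     n = len(s)
--     window_counts = {}
--     for j in range(len(text) - n + 1):
--         w = text[j:j+n]
--         window_counts[w] = window_counts.get(w, 0) + 1
--     result = 0
--     for i in range(n):
--         result += window_counts.get(s[i:] + s[:i], 0)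
--     return result
-- ===== Notes on version B (the rewrite author's own statement) =====
-- stated objective: alternative
-- what changed: Instead of scanning all windows of the text once per rotation, B builds a multiplicity dict of the text's windows in one pass and then adds each rotation's window count in a second pass, removing the nested scan.
import Mathlib
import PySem

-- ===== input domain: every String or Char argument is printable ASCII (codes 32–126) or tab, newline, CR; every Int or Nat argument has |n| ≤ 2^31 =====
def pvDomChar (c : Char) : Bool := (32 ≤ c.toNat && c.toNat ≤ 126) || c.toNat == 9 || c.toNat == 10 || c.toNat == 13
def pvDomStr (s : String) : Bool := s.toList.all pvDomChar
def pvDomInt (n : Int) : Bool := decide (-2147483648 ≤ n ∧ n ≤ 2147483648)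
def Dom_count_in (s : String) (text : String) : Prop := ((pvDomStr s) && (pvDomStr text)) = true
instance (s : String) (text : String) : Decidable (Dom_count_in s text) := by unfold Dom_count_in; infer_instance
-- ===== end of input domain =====

-- B replaces A's per-rotation scan of all text windows by one multiplicity dict of the windows plus a single pass over the rotations.

-- ===== PORT A =====
-- literal port of A: for each rotation s[i:]+s[:i], scan every window of text and count matches
def count_in (s : String) (text : String) : Int :=
  let sl := s.toList
  let tl := text.toList
  let n : Int := PySem.Chars.len sl
  (PySem.List.pyRange 0 n 1).foldl (fun result i =>
    let shift := PySem.List.slice sl (some i) none ++ PySem.List.slice sl none (some i)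
    (PySem.List.pyRange 0 ((PySem.Chars.len tl) - n + 1) 1).foldl (fun r j =>
      if PySem.List.slice tl (some j) (some (j + n)) = shift then r + 1 else r) result) 0

-- ===== PORT B =====
-- literal port of B: window_counts[w] = window_counts.get(w, 0) + 1 over the windows of text,
-- then result += window_counts.get(rotation, 0) over the rotations of s
def count_in_alt (s : String) (text : String) : Int :=
  let sl := s.toList
  let tl := text.toList
  let n : Int := PySem.Chars.len sl
  let window_counts : PySem.Dict (List Char) Int :=
    (PySem.List.pyRange 0 ((PySem.Chars.len tl) - n + 1) 1).foldl (fun d j =>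
      let w := PySem.List.slice tl (some j) (some (j + n))
      d.insert w (d.getD w 0 + 1)) PySem.Dict.empty
  (PySem.List.pyRange 0 n 1).foldl (fun result i =>
    result + window_counts.getD (PySem.List.slice sl (some i) none ++ PySem.List.slice sl none (some i)) 0) 0

-- ===== PRECONDITION & SPEC =====
def Spec_count_in (s : String) (text : String) (out : Int) : Prop := out = count_in_alt s text
instance (s : String) (text : String) (out : Int) : Decidable (Spec_count_in s text out) := by unfold Spec_count_in; infer_instance

-- ===== CLAIM (what is proved, stated in full; the proofs are below) =====
def Claim_equal_count_in : Prop := ∀ (s : String) (text : String), Dom_count_in s text → Spec_count_in s text (count_in s text)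

-- ===== LEMMAS AND PROOFS =====

-- the two loop shapes agree for ANY index ranges I, J and window/rotation functions w, rot:
-- A's inner scan counts the j with w j = rot i; B's dict of the w j's looks that count up
theorem pv_loops (I J : List Int) (rot w : Int → List Char) :
    I.foldl (fun (result : Int) i => J.foldl (fun r j => if w j = rot i then r + 1 else r) result) 0
      = I.foldl (fun (result : Int) i =>
          result + (J.foldl (fun d j => d.insert (w j) (d.getD (w j) 0 + 1)) PySem.Dict.empty).getD (rot i) 0) 0 := by
  apply PySem.List.foldl_congr_mem
  intro acc i _
  rw [PySem.List.foldl_ite_add_one (fun j => w j = rot i) J acc]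
  have key := PySem.Dict.getD_foldl_insert_add_one (J.map w) (PySem.Dict.empty : PySem.Dict (List Char) Int) (rot i)
  rw [List.foldl_map] at key
  rw [key, PySem.Dict.getD_empty, zero_add, List.count_eq_countP, List.countP_map]
  congr 2
  apply List.countP_congr
  intro j _
  simp only [Function.comp_apply, Bool.beq_eq_decide_eq, decide_eq_true_eq]

-- ===== VERDICT (by name: the statement is the Claim_ definition above) =====
theorem count_in_spec : Claim_equal_count_in := by
  intro s text _
  unfold Spec_count_in count_in count_in_alt
  exact pv_loops (PySem.List.pyRange 0 (PySem.Chars.len s.toList) 1)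
    (PySem.List.pyRange 0 (PySem.Chars.len text.toList - PySem.Chars.len s.toList + 1) 1)
    (fun i => PySem.List.slice s.toList (some i) none ++ PySem.List.slice s.toList none (some i))
    (fun j => PySem.List.slice text.toList (some j) (some (j + PySem.Chars.len s.toList)))
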